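-- pv_equiv track=rewrite | github.com/simoneniro17/TinyTroupeThesis | tinytroupe/profiling.py | _categorize_connectivity
-- ===== SOURCE A (Python) =====
-- from typing import List, Dict, Any, Optional, Union, Callable
--
-- def _categorize_connectivity(connections: List[int]) -> Dict[str, int]:
--     """Categorize agents by their connectivity level."""
--     categories = {'isolated': 0, 'low': 0, 'medium': 0, 'high': 0}
--
--     for conn in connections:
--         if conn == 0:
--             categories['isolated'] += 1
--         elif conn <= 2:
--             categories['low'] += 1
--         elif conn <= 5:
--             categories['medium'] += 1
--         else:
--             categories['high'] += 1
--
--     return categories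
-- ===== SOURCE B (Python) =====
-- def _categorize_connectivity(connections):
--     """Categorize agents by their connectivity level (four independent counting passes)."""
--     return {
--         'isolated': sum(1 for c in connections if c == 0),
--         'low': sum(1 for c in connections if c != 0 and c <= 2),
--         'medium': sum(1 for c in connections if 2 < c <= 5),
--         'high': sum(1 for c in connections if c > 5),
--     }
-- ===== Notes on version B (the rewrite author's own statement) =====
-- stated objective: alternative
-- what changed: Replaces the single pass with a branch per element by four independent counting passes, one per bucket, each summing a mutually exclusive predicate, then builds the dict at once.
import Mathlib
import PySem

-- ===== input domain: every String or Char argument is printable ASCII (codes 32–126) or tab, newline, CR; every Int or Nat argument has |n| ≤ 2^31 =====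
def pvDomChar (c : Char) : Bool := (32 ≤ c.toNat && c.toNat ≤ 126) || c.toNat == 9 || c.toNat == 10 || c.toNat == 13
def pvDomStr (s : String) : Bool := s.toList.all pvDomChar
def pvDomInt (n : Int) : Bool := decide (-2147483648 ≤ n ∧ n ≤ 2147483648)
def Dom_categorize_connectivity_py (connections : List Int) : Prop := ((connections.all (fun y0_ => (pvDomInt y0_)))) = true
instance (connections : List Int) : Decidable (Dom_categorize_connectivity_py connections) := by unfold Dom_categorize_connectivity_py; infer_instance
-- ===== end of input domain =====

-- B replaces A's single loop with a branch per element by four independent counting passes, one per bucket (objective: alternative decomposition, same cost).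


-- ===== PORT A =====
def categorize_connectivity_py (connections : List Int) : List (String × Int) :=
  (connections.foldl (fun d conn =>
      if conn == 0 then d.modify "isolated" 0 (· + 1)
      else if conn ≤ 2 then d.modify "low" 0 (· + 1)
      else if conn ≤ 5 then d.modify "medium" 0 (· + 1)
      else d.modify "high" 0 (· + 1))
    (PySem.Dict.ofList [("isolated", (0 : Int)), ("low", 0), ("medium", 0), ("high", 0)])).items

-- ===== PORT B =====
def categorize_connectivity_py_alt (connections : List Int) : List (String × Int) :=
  [("isolated", (connections.countP (fun c => c == 0) : Int)),
   ("low", (connections.countP (fun c => c != 0 && c ≤ 2) : Int)),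
   ("medium", (connections.countP (fun c => 2 < c && c ≤ 5) : Int)),
   ("high", (connections.countP (fun c => 5 < c) : Int))]

-- ===== PRECONDITION & SPEC =====
def Spec_categorize_connectivity_py (connections : List Int) (out : List (String × Int)) : Prop := out = categorize_connectivity_py_alt connections
instance (connections : List Int) (out : List (String × Int)) : Decidable (Spec_categorize_connectivity_py connections out) := by unfold Spec_categorize_connectivity_py; infer_instance

-- ===== CLAIM (what is proved, stated in full; the proofs are below) =====
def Claim_equal_categorize_connectivity_py : Prop := ∀ (connections : List Int), Dom_categorize_connectivity_py connections → Spec_categorize_connectivity_py connections (categorize_connectivity_py connections)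

-- ===== LEMMAS AND PROOFS =====

-- ===== VERDICT (by name: the statement is the Claim_ definition above) =====
lemma cc_invariant (conns : List Int) (i l m h : Int) :
    (conns.foldl (fun d conn =>
        if conn == 0 then d.modify "isolated" 0 (· + 1)
        else if conn ≤ 2 then d.modify "low" 0 (· + 1)
        else if conn ≤ 5 then d.modify "medium" 0 (· + 1)
        else d.modify "high" 0 (· + 1))
      (PySem.Dict.mk [("isolated", i), ("low", l), ("medium", m), ("high", h)])).items =
    [("isolated", i + conns.countP (fun c => c == 0)),
     ("low", l + conns.countP (fun c => c != 0 && c ≤ 2)),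
     ("medium", m + conns.countP (fun c => 2 < c && c ≤ 5)),
     ("high", h + conns.countP (fun c => 5 < c))] := by
  induction conns generalizing i l m h with
  | nil => simp
  | cons c rest ih =>
    simp only [List.foldl_cons]
    by_cases h0 : c = 0
    · rw [if_pos (by simp [h0]),
        show (PySem.Dict.mk [("isolated", i), ("low", l), ("medium", m), ("high", h)]).modify
            "isolated" 0 (· + 1)
          = PySem.Dict.mk [("isolated", i + 1), ("low", l), ("medium", m), ("high", h)] from by
          simp [PySem.Dict.modify, PySem.Dict.insert, PySem.Dict.contains_mk, PySem.Dict.getD, PySem.Dict.get?_mk_cons],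
        ih]
      subst h0
      simp [Prod.ext_iff]
      omega
    · by_cases h2 : c ≤ 2
      · rw [if_neg (by simp [h0]), if_pos h2,
          show (PySem.Dict.mk [("isolated", i), ("low", l), ("medium", m), ("high", h)]).modify
              "low" 0 (· + 1)
            = PySem.Dict.mk [("isolated", i), ("low", l + 1), ("medium", m), ("high", h)] from by
            simp [PySem.Dict.modify, PySem.Dict.insert, PySem.Dict.contains_mk, PySem.Dict.getD, PySem.Dict.get?_mk_cons],
          ih]
        simp [List.countP_cons, Prod.ext_iff, h0, h2, show ¬(2 : Int) < c from by omega]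
        omega
      · by_cases h5 : c ≤ 5
        · rw [if_neg (by simp [h0]), if_neg h2, if_pos h5,
            show (PySem.Dict.mk [("isolated", i), ("low", l), ("medium", m), ("high", h)]).modify
                "medium" 0 (· + 1)
              = PySem.Dict.mk [("isolated", i), ("low", l), ("medium", m + 1), ("high", h)] from by
              simp [PySem.Dict.modify, PySem.Dict.insert, PySem.Dict.contains_mk, PySem.Dict.getD, PySem.Dict.get?_mk_cons],
            ih]
          simp [List.countP_cons, Prod.ext_iff, h0, h2, h5,
            show (2 : Int) < c from by omega, show ¬(5 : Int) < c from by omega]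
          omega
        · rw [if_neg (by simp [h0]), if_neg h2, if_neg h5,
            show (PySem.Dict.mk [("isolated", i), ("low", l), ("medium", m), ("high", h)]).modify
                "high" 0 (· + 1)
              = PySem.Dict.mk [("isolated", i), ("low", l), ("medium", m), ("high", h + 1)] from by
              simp [PySem.Dict.modify, PySem.Dict.insert, PySem.Dict.contains_mk, PySem.Dict.getD, PySem.Dict.get?_mk_cons],
            ih]
          simp [List.countP_cons, Prod.ext_iff, h0, h2, h5, show (5 : Int) < c from by omega]
          omega

theorem categorize_connectivity_py_spec : Claim_equal_categorize_connectivity_py := by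
  intro conns _
  show _ = _
  unfold categorize_connectivity_py categorize_connectivity_py_alt
  rw [show PySem.Dict.ofList [("isolated", (0 : Int)), ("low", 0), ("medium", 0), ("high", 0)] =
      PySem.Dict.mk [("isolated", (0 : Int)), ("low", 0), ("medium", 0), ("high", 0)] from by decide]
  rw [cc_invariant]
  simp
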